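-- pv_equiv track=rewrite | github.com/coopersigrist/110_game_outline | connect4.py | n_in_a_row
-- ===== SOURCE A (Python) =====
-- def n_in_a_row(board, row, col, dir=(0,1), n=4):
--
--     end_loc = (row+(n*dir[0]), col+(n*dir[1]))
--
--     if end_loc[0] > 6 or end_loc[0] < 0 or end_loc[1] > 6 or end_loc[1] < 0:
--         return False
--
--     if n <= 1:
--         return True
--
--     match_next = board[row][col] == board[row+dir[0]][col+(dir[1])]
--
--     if n <= 2:
--         return match_next
--
--     else:
--         return match_next and n_in_a_row(board, row+dir[0], col+(dir[1]), dir=dir, n=n-1)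
-- ===== SOURCE B (Python) =====
-- def n_in_a_row(board, row, col, dir=(0,1), n=4):
--     end_r, end_c = row + n*dir[0], col + n*dir[1]
--     if end_r > 6 or end_r < 0 or end_c > 6 or end_c < 0:
--         return False
--     for i in range(n-1):
--         if board[row+i*dir[0]][col+i*dir[1]] != board[row+(i+1)*dir[0]][col+(i+1)*dir[1]]:
--             return False
--     return True
-- ===== Notes on version B (the rewrite author's own statement) =====
-- stated objective: simpler
-- what changed: Replaced A's tail recursion (which re-checks the same endpoint bound at every level) with a single endpoint bounds check followed by one iterative pass comparing consecutive cells for i in range(n-1).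
import Mathlib
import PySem

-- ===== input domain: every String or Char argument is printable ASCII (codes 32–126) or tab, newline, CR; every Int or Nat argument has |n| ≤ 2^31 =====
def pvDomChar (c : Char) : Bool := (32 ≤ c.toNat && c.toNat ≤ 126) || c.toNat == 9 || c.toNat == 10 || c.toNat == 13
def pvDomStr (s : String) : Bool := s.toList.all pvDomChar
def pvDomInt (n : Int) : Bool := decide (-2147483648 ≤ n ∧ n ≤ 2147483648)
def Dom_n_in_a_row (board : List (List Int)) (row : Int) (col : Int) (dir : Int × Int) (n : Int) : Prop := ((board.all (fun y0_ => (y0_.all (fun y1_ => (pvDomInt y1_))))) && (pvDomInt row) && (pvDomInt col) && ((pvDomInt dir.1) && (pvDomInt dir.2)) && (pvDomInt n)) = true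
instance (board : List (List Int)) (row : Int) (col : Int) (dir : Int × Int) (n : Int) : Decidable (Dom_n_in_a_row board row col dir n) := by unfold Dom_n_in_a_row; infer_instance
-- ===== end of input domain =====

-- B replaces A's tail recursion (which re-checks the same endpoint at every level) with a single
-- endpoint bounds check followed by one iterative pass over the consecutive-cell comparisons
-- (objective: simpler).

-- board[r][c] with Python index semantics (negative wrap; none = IndexError); used by both ports

def pvCell (board : List (List Int)) (r c : Int) : Option Int :=
  (PySem.List.pyGet? board r).bind (fun rw => PySem.List.pyGet? rw c)

-- ===== PORT A =====
def n_in_a_row (board : List (List Int)) (row : Int) (col : Int) (dir : Int × Int) (n : Int) : Bool :=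
  let endLoc : Int × Int := (row + n * dir.1, col + n * dir.2)
  if endLoc.1 > 6 || endLoc.1 < 0 || endLoc.2 > 6 || endLoc.2 < 0 then false
  else if n ≤ 1 then true
  else
    let matchNext := pvCell board row col == pvCell board (row + dir.1) (col + dir.2)
    if h : n ≤ 2 then matchNext
    else matchNext && n_in_a_row board (row + dir.1) (col + dir.2) dir (n - 1)
termination_by n.toNat
decreasing_by omega

-- ===== PORT B =====
def n_in_a_row_alt (board : List (List Int)) (row : Int) (col : Int) (dir : Int × Int) (n : Int) : Bool :=
  let endR := row + n * dir.1
  let endC := col + n * dir.2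
  if endR > 6 || endR < 0 || endC > 6 || endC < 0 then false
  else
    (PySem.List.pyRange 0 (n - 1) 1).all (fun i =>
      pvCell board (row + i * dir.1) (col + i * dir.2)
        == pvCell board (row + (i + 1) * dir.1) (col + (i + 1) * dir.2))

-- ===== PRECONDITION & SPEC =====
-- Pre_ excludes exactly the inputs on which the Python A raises IndexError: the endpoint is
-- in-board and n ≥ 2, and some comparison step touches an out-of-range cell without an earlier
-- step (on two in-range cells) mismatching and stopping the scan first.
def Pre_n_in_a_row (board : List (List Int)) (row : Int) (col : Int) (dir : Int × Int) (n : Int) : Prop :=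
  (row + n * dir.1 > 6 ∨ row + n * dir.1 < 0 ∨ col + n * dir.2 > 6 ∨ col + n * dir.2 < 0) ∨
  n ≤ 1 ∨
  (∀ i ∈ PySem.List.pyRange 0 (n - 1) 1,
    (pvCell board (row + i * dir.1) (col + i * dir.2) = none ∨
     pvCell board (row + (i + 1) * dir.1) (col + (i + 1) * dir.2) = none) →
    ∃ j ∈ PySem.List.pyRange 0 i 1,
      pvCell board (row + j * dir.1) (col + j * dir.2) ≠ none ∧
      pvCell board (row + (j + 1) * dir.1) (col + (j + 1) * dir.2) ≠ none ∧
      pvCell board (row + j * dir.1) (col + j * dir.2) ≠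
        pvCell board (row + (j + 1) * dir.1) (col + (j + 1) * dir.2))
instance (board : List (List Int)) (row : Int) (col : Int) (dir : Int × Int) (n : Int) : Decidable (Pre_n_in_a_row board row col dir n) := by unfold Pre_n_in_a_row; infer_instance

def pvWitness_n_in_a_row : List (List Int) × Int × Int × (Int × Int) × Int := ([[0, 0, 0, 0]], 0, 0, (0, 1), 4)

def Spec_n_in_a_row (board : List (List Int)) (row : Int) (col : Int) (dir : Int × Int) (n : Int) (out : Bool) : Prop := out = n_in_a_row_alt board row col dir n
instance (board : List (List Int)) (row : Int) (col : Int) (dir : Int × Int) (n : Int) (out : Bool) : Decidable (Spec_n_in_a_row board row col dir n out) := by unfold Spec_n_in_a_row; infer_instance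

-- ===== CLAIM (what is proved, stated in full; the proofs are below) =====
def Claim_equal_n_in_a_row : Prop := ∀ (board : List (List Int)) (row : Int) (col : Int) (dir : Int × Int) (n : Int), Dom_n_in_a_row board row col dir n → Pre_n_in_a_row board row col dir n → Spec_n_in_a_row board row col dir n (n_in_a_row board row col dir n)

-- ===== LEMMAS AND PROOFS =====
lemma pyRange_nonpos (m : Int) (hm : m ≤ 0) : PySem.List.pyRange 0 m 1 = [] := by
  rw [PySem.List.pyRange_one]
  have h0 : (m - 0).toNat = 0 := by omega
  rw [h0]
  simp

lemma all_pyRange_shift (f : Int → Bool) (m : Int) (hm : 1 ≤ m) :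
    (PySem.List.pyRange 0 m 1).all f
      = (f 0 && (PySem.List.pyRange 0 (m - 1) 1).all (fun i => f (i + 1))) := by
  rw [PySem.List.pyRange_one, PySem.List.pyRange_one]
  have h : (m - 0).toNat = (m - 1 - 0).toNat + 1 := by omega
  rw [h, List.range_succ_eq_map]
  simp only [List.map_cons, List.all_cons, List.map_map, List.all_map]
  congr 1

lemma A_oob (board : List (List Int)) (row col d0 d1 n : Int)
    (hb : 6 < row + n * d0 ∨ row + n * d0 < 0 ∨ 6 < col + n * d1 ∨ col + n * d1 < 0) :
    n_in_a_row board row col (d0, d1) n = false := by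
  rw [n_in_a_row]
  split_ifs with h1 <;> first | rfl | (exfalso; simp at h1; omega)

lemma A_le_one (board : List (List Int)) (row col d0 d1 n : Int)
    (hb : ¬(6 < row + n * d0 ∨ row + n * d0 < 0 ∨ 6 < col + n * d1 ∨ col + n * d1 < 0))
    (hn : n ≤ 1) :
    n_in_a_row board row col (d0, d1) n = true := by
  rw [n_in_a_row]
  split_ifs with h1 h2 <;> first | rfl | (exfalso; simp at h1 ⊢; omega)

lemma A_two (board : List (List Int)) (row col d0 d1 : Int)
    (hb : ¬(6 < row + 2 * d0 ∨ row + 2 * d0 < 0 ∨ 6 < col + 2 * d1 ∨ col + 2 * d1 < 0)) :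
    n_in_a_row board row col (d0, d1) 2
      = (pvCell board row col == pvCell board (row + d0) (col + d1)) := by
  rw [n_in_a_row]
  split_ifs with h1 h2 h3 <;> first | rfl | (exfalso; simp at h1 ⊢; omega)

lemma A_step (board : List (List Int)) (row col d0 d1 n : Int)
    (hb : ¬(row + n * d0 > 6 ∨ row + n * d0 < 0 ∨ col + n * d1 > 6 ∨ col + n * d1 < 0))
    (hn2 : 2 < n) :
    n_in_a_row board row col (d0, d1) n =
      ((pvCell board row col == pvCell board (row + d0) (col + d1)) &&
        n_in_a_row board (row + d0) (col + d1) (d0, d1) (n - 1)) := by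
  rw [n_in_a_row]
  rw [if_neg (by simp; omega), if_neg (by omega), dif_neg (by omega)]

lemma alt_oob (board : List (List Int)) (row col d0 d1 n : Int)
    (hb : 6 < row + n * d0 ∨ row + n * d0 < 0 ∨ 6 < col + n * d1 ∨ col + n * d1 < 0) :
    n_in_a_row_alt board row col (d0, d1) n = false := by
  rw [n_in_a_row_alt]
  split_ifs with h1 <;> first | rfl | (exfalso; simp at h1 ⊢; omega)

lemma alt_inb (board : List (List Int)) (row col d0 d1 n : Int)
    (hb : ¬(6 < row + n * d0 ∨ row + n * d0 < 0 ∨ 6 < col + n * d1 ∨ col + n * d1 < 0)) :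
    n_in_a_row_alt board row col (d0, d1) n
      = (PySem.List.pyRange 0 (n - 1) 1).all (fun i =>
          pvCell board (row + i * d0) (col + i * d1)
            == pvCell board (row + (i + 1) * d0) (col + (i + 1) * d1)) := by
  rw [n_in_a_row_alt]
  rw [if_neg (by simp; omega)]

lemma main_eq (board : List (List Int)) (d0 d1 : Int) :
    ∀ (k : Nat) (row col n : Int), n.toNat = k →
      n_in_a_row board row col (d0, d1) n = n_in_a_row_alt board row col (d0, d1) n := by
  intro k
  induction k with
  | zero =>
      intro row col n hn
      by_cases hb : (6 < row + n * d0 ∨ row + n * d0 < 0 ∨ 6 < col + n * d1 ∨ col + n * d1 < 0)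
      · rw [A_oob _ _ _ _ _ _ hb, alt_oob _ _ _ _ _ _ hb]
      · rw [A_le_one _ _ _ _ _ _ hb (by omega), alt_inb _ _ _ _ _ _ hb,
            pyRange_nonpos (n - 1) (by omega)]
        rfl
  | succ k ih =>
      intro row col n hn
      by_cases hb : (6 < row + n * d0 ∨ row + n * d0 < 0 ∨ 6 < col + n * d1 ∨ col + n * d1 < 0)
      · rw [A_oob _ _ _ _ _ _ hb, alt_oob _ _ _ _ _ _ hb]
      · by_cases hn1 : n ≤ 1
        · rw [A_le_one _ _ _ _ _ _ hb hn1, alt_inb _ _ _ _ _ _ hb,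
              pyRange_nonpos (n - 1) (by omega)]
          rfl
        · by_cases hn2 : n ≤ 2
          · have hneq : n = 2 := by omega
            subst hneq
            rw [A_two _ _ _ _ _ hb, alt_inb _ _ _ _ _ _ hb,
                all_pyRange_shift _ _ (by omega), pyRange_nonpos (2 - 1 - 1) (by omega)]
            simp only [List.all_nil, Bool.and_true]
            norm_num
          · have hrec := ih (row + d0) (col + d1) (n - 1) (by omega)
            have hend : row + d0 + (n - 1) * d0 = row + n * d0 := by ring
            have hend2 : col + d1 + (n - 1) * d1 = col + n * d1 := by ring
            rw [A_step board row col d0 d1 n (by omega) (by omega), hrec,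
                alt_inb _ _ _ _ _ _ (by rw [hend, hend2]; omega),
                alt_inb _ _ _ _ _ _ hb]
            conv_rhs => rw [all_pyRange_shift _ (n - 1) (by omega : (1:Int) ≤ n - 1)]
            have hsh : ∀ i : Int,
                (pvCell board (row + d0 + i * d0) (col + d1 + i * d1)
                  == pvCell board (row + d0 + (i + 1) * d0) (col + d1 + (i + 1) * d1))
                = (pvCell board (row + (i + 1) * d0) (col + (i + 1) * d1)
                  == pvCell board (row + (i + 1 + 1) * d0) (col + (i + 1 + 1) * d1)) := by
              intro i
              congr 2 <;> ring
            simp only [hsh]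
            congr 1
            norm_num

-- ===== VERDICT (by name: the statement is the Claim_ definition above) =====
theorem n_in_a_row_spec : Claim_equal_n_in_a_row := by
  intro board row col dir n _ _
  unfold Spec_n_in_a_row
  obtain ⟨d0, d1⟩ := dir
  exact main_eq board d0 d1 n.toNat row col n rfl
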